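-- pv_equiv track=rewrite | github.com/infinityb/matrix-nano | packages/nano/nano/__init__.py | greed_roll_score
-- ===== SOURCE A (Python) =====
-- SCORING_TABLE_PREFIXES = [
--     (1200, [1, 2, 3, 4, 5, 6]),
--     ( 800, [2, 2, 3, 3, 4, 4]),
--     (8000, [1, 1, 1, 1, 1, 1]),
--     (4000, [1, 1, 1, 1, 1]),
--     (2000, [1, 1, 1, 1]),
--     (1000, [1, 1, 1]),
--     ( 100, [1]),
--     (1600, [2, 2, 2, 2, 2, 2]),
--     ( 800, [2, 2, 2, 2, 2]),
--     ( 400, [2, 2, 2, 2]),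
--     ( 200, [2, 2, 2]),
--     (2400, [3, 3, 3, 3, 3, 3]),
--     (1200, [3, 3, 3, 3, 3]),
--     ( 600, [3, 3, 3, 3]),
--     ( 300, [3, 3, 3]),
--     (3200, [4, 4, 4, 4, 4, 4]),
--     (1600, [4, 4, 4, 4, 4]),
--     ( 800, [4, 4, 4, 4]),
--     ( 400, [4, 4, 4]),
--     (4000, [5, 5, 5, 5, 5, 5]),
--     (2000, [5, 5, 5, 5, 5]),
--     (1000, [5, 5, 5, 5]),
--     ( 500, [5, 5, 5]),
--     (  50, [5]),
--     (4800, [6, 6, 6, 6, 6, 6]),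
--     (2400, [6, 6, 6, 6, 6]),
--     (1200, [6, 6, 6, 6]),
--     ( 600, [6, 6, 6]),
-- ]
--
-- def greed_roll_score(roll):
--     # score_acc = 0
--     score_records = []
--     while True:
--         for vv in SCORING_TABLE_PREFIXES:
--             (score, prefix) = vv
--             if roll[:len(prefix)] == prefix:
--                 # score_acc += score
--                 score_records.append(vv)
--                 roll = roll[len(prefix):]
--                 break
--         else:
--             break
--     return score_records
-- ===== SOURCE B (Python) =====
-- RUN_SCORES = {
--     1: {1: 100, 3: 1000, 4: 2000, 5: 4000, 6: 8000},
--     2: {3: 200, 4: 400, 5: 800, 6: 1600},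
--     3: {3: 300, 4: 600, 5: 1200, 6: 2400},
--     4: {3: 400, 4: 800, 5: 1600, 6: 3200},
--     5: {1: 50, 3: 500, 4: 1000, 5: 2000, 6: 4000},
--     6: {3: 600, 4: 1200, 5: 2400, 6: 4800},
-- }
--
-- def greed_roll_score(roll):
--     records = []
--     while roll:
--         head6 = roll[:6]
--         if head6 == [1, 2, 3, 4, 5, 6]:
--             records.append((1200, [1, 2, 3, 4, 5, 6]))
--             roll = roll[6:]
--             continue
--         if head6 == [2, 2, 3, 3, 4, 4]:
--             records.append((800, [2, 2, 3, 3, 4, 4]))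
--             roll = roll[6:]
--             continue
--         v = roll[0]
--         scores = RUN_SCORES.get(v)
--         if scores is None:
--             break
--         run = 1
--         for x in roll[1:6]:
--             if x != v:
--                 break
--             run += 1
--         while run and run not in scores:
--             run -= 1
--         if run == 0:
--             break
--         records.append((scores[run], [v] * run))
--         roll = roll[run:]
--     return records
-- ===== Notes on version B (the rewrite author's own statement) =====
-- stated objective: alternative
-- what changed: Instead of rescanning the 28-entry prefix table each round, B branches on the two special 6-prefixes, then computes the leading run length of the first die and resolves the score by a per-value {run-length: score} dict lookup, shrinking the run to the longest keyed length.
import Mathlib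
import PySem

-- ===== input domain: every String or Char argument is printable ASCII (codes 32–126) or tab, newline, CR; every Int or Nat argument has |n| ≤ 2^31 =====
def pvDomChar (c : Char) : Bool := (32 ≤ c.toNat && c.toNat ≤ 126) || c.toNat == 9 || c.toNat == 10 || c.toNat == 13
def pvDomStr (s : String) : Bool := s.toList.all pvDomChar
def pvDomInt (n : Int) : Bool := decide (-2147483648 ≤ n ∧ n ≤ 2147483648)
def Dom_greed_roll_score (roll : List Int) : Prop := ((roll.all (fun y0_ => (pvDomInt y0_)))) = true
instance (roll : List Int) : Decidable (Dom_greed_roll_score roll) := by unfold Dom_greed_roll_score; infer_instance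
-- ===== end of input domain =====

-- B replaces A's repeated scan of the 28-entry prefix table by a head-value dispatch:
-- two special 6-prefix checks, then a leading-run count resolved through a per-value
-- {run-length : score} dictionary (a different algorithm of similar cost).

-- ===== PORT A =====
def pvTable : List (Int × List Int) := [
  (1200, [1, 2, 3, 4, 5, 6]),
  ( 800, [2, 2, 3, 3, 4, 4]),
  (8000, [1, 1, 1, 1, 1, 1]),
  (4000, [1, 1, 1, 1, 1]),
  (2000, [1, 1, 1, 1]),
  (1000, [1, 1, 1]),
  ( 100, [1]),
  (1600, [2, 2, 2, 2, 2, 2]),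
  ( 800, [2, 2, 2, 2, 2]),
  ( 400, [2, 2, 2, 2]),
  ( 200, [2, 2, 2]),
  (2400, [3, 3, 3, 3, 3, 3]),
  (1200, [3, 3, 3, 3, 3]),
  ( 600, [3, 3, 3, 3]),
  ( 300, [3, 3, 3]),
  (3200, [4, 4, 4, 4, 4, 4]),
  (1600, [4, 4, 4, 4, 4]),
  ( 800, [4, 4, 4, 4]),
  ( 400, [4, 4, 4]),
  (4000, [5, 5, 5, 5, 5, 5]),
  (2000, [5, 5, 5, 5, 5]),
  (1000, [5, 5, 5, 5]),
  ( 500, [5, 5, 5]),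
  (  50, [5]),
  (4800, [6, 6, 6, 6, 6, 6]),
  (2400, [6, 6, 6, 6, 6]),
  (1200, [6, 6, 6, 6]),
  ( 600, [6, 6, 6])]

-- A's 'while True' with the inner 'for … else: break'; fuel = |roll| + 1 only makes the
-- same computation total (each accepted prefix is nonempty, so at most |roll| matches occur).
def pvGreedLoopA : Nat → List Int → List (Int × List Int) → List (Int × List Int)
  | 0, _, acc => acc
  | fuel + 1, roll, acc =>
    match pvTable.find? (fun vv => roll.take vv.2.length == vv.2) with
    | some vv => pvGreedLoopA fuel (roll.drop vv.2.length) (acc ++ [vv])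
    | none => acc

def greed_roll_score (roll : List Int) : List (Int × List Int) :=
  pvGreedLoopA (roll.length + 1) roll []

-- ===== PORT B =====
def pvRunScores : List (Int × List (Nat × Int)) := [
  (1, [(1, 100), (3, 1000), (4, 2000), (5, 4000), (6, 8000)]),
  (2, [(3, 200), (4, 400), (5, 800), (6, 1600)]),
  (3, [(3, 300), (4, 600), (5, 1200), (6, 2400)]),
  (4, [(3, 400), (4, 800), (5, 1600), (6, 3200)]),
  (5, [(1, 50), (3, 500), (4, 1000), (5, 2000), (6, 4000)]),
  (6, [(3, 600), (4, 1200), (5, 2400), (6, 4800)])]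

-- 'run = 1; for x in roll[1:6]: if x != v: break; run += 1'
def pvRunAux : List Int → Int → Nat → Nat
  | [], _, run => run
  | x :: rest, v, run => if x ≠ v then run else pvRunAux rest v (run + 1)

-- 'while run and run not in scores: run -= 1'
def pvShrink (scores : List (Nat × Int)) : Nat → Nat
  | 0 => 0
  | k + 1 => if (scores.lookup (k + 1)).isSome then k + 1 else pvShrink scores k

-- B's 'while roll:' loop; same fuel argument as A's loop.
def pvGreedLoopB : Nat → List Int → List (Int × List Int) → List (Int × List Int)
  | 0, _, acc => acc
  | fuel + 1, roll, acc =>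
    match roll with
    | [] => acc
    | v :: rest =>
      if (v :: rest).take 6 = [1, 2, 3, 4, 5, 6] then
        pvGreedLoopB fuel ((v :: rest).drop 6) (acc ++ [(1200, [1, 2, 3, 4, 5, 6])])
      else if (v :: rest).take 6 = [2, 2, 3, 3, 4, 4] then
        pvGreedLoopB fuel ((v :: rest).drop 6) (acc ++ [(800, [2, 2, 3, 3, 4, 4])])
      else
        match pvRunScores.lookup v with
        | none => acc
        | some scores =>
          let run := pvShrink scores (pvRunAux (rest.take 5) v 1)
          if run = 0 then acc
          else pvGreedLoopB fuel ((v :: rest).drop run)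
                 (acc ++ [((scores.lookup run).getD 0, List.replicate run v)])

def greed_roll_score_alt (roll : List Int) : List (Int × List Int) :=
  pvGreedLoopB (roll.length + 1) roll []

-- ===== PRECONDITION & SPEC =====
def Spec_greed_roll_score (roll : List Int) (out : List (Int × List Int)) : Prop := out = greed_roll_score_alt roll
instance (roll : List Int) (out : List (Int × List Int)) : Decidable (Spec_greed_roll_score roll out) := by unfold Spec_greed_roll_score; infer_instance

-- ===== CLAIM (what is proved, stated in full; the proofs are below) =====
def Claim_equal_greed_roll_score : Prop := ∀ (roll : List Int), Dom_greed_roll_score roll → Spec_greed_roll_score roll (greed_roll_score roll)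

-- ===== LEMMAS AND PROOFS =====

-- One round of A: the first table entry whose prefix matches.
def pvStepA (roll : List Int) : Option (Int × List Int) :=
  pvTable.find? (fun vv => roll.take vv.2.length == vv.2)

-- One round of B, mirroring the body of pvGreedLoopB.
def pvStepB (roll : List Int) : Option (Int × List Int) :=
  match roll with
  | [] => none
  | v :: rest =>
    if (v :: rest).take 6 = [1, 2, 3, 4, 5, 6] then some (1200, [1, 2, 3, 4, 5, 6])
    else if (v :: rest).take 6 = [2, 2, 3, 3, 4, 4] then some (800, [2, 2, 3, 3, 4, 4])
    else
      match pvRunScores.lookup v with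
      | none => none
      | some scores =>
        let run := pvShrink scores (pvRunAux (rest.take 5) v 1)
        if run = 0 then none
        else some ((scores.lookup run).getD 0, List.replicate run v)

lemma pvRunAux_eq (l : List Int) (v : Int) (r : Nat) :
    pvRunAux l v r = r + (l.takeWhile (fun x => x == v)).length := by
  induction l generalizing r with
  | nil => simp [pvRunAux]
  | cons x t ih =>
    by_cases h : x = v
    · simp [pvRunAux, h, ih]; omega
    · simp [pvRunAux, h]

lemma takeWhile_take_len (p : Int → Bool) (l : List Int) (n : Nat) :
    ((l.take n).takeWhile p).length = min n (l.takeWhile p).length := by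
  induction l generalizing n with
  | nil => simp
  | cons x t ih =>
    cases n with
    | zero => simp
    | succ m =>
      by_cases h : p x
      · simp [h, ih]
      · simp [h]

lemma take_eq_replicate_iff (l : List Int) (v : Int) (n : Nat) :
    l.take n = List.replicate n v ↔ n ≤ (l.takeWhile (fun x => x == v)).length := by
  induction l generalizing n with
  | nil =>
    simp only [List.take_nil, List.takeWhile_nil, List.length_nil, Nat.le_zero]
    constructor
    · intro h; by_contra hn
      have := congrArg List.length h; simp at this; omega
    · intro h; simp [h]
  | cons x t ih =>
    cases n with
    | zero => simp
    | succ m =>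
      by_cases h : x = v
      · simp [h, List.replicate_succ, ih]
      · simp [h, List.replicate_succ]

lemma pvStep_eq (roll : List Int) : pvStepA roll = pvStepB roll := by
  cases roll with
  | nil => rfl
  | cons v rest =>
    by_cases h1 : (v :: rest).take 6 = [1, 2, 3, 4, 5, 6]
    · simp [pvStepA, pvStepB, pvTable, List.find?, h1]
    by_cases h2 : (v :: rest).take 6 = [2, 2, 3, 3, 4, 4]
    · simp [pvStepA, pvStepB, pvTable, List.find?, h1, h2]
    by_cases hv1 : v = 1
    · subst hv1
      obtain ⟨R, hR⟩ : ∃ R, pvRunAux (List.take 5 rest) ((1:Int)) 1 = R := ⟨_, rfl⟩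
      have hR1 : 1 ≤ R := by rw [← hR, pvRunAux_eq]; omega
      have hR6 : R ≤ 6 := by rw [← hR, pvRunAux_eq, takeWhile_take_len]; omega
      have hT : ∀ m : Nat, m ≤ 5 → ((List.take m rest == List.replicate m ((1:Int))) = decide (m + 1 ≤ R)) := by
        intro m hm
        have hiff : (List.take m rest = List.replicate m ((1:Int))) ↔ (m + 1 ≤ R) := by
          rw [take_eq_replicate_iff, ← hR, pvRunAux_eq, takeWhile_take_len]; omega
        rw [beq_eq_decide, decide_eq_decide.mpr hiff]
      have t1 : ((List.take 1 rest == ([1] : List Int)) = decide (1 + 1 ≤ R)) := by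
        rw [show ([1] : List Int) = List.replicate 1 (1:Int) from rfl]; exact hT 1 (by omega)
      have t2 : ((List.take 2 rest == ([1, 1] : List Int)) = decide (2 + 1 ≤ R)) := by
        rw [show ([1, 1] : List Int) = List.replicate 2 (1:Int) from rfl]; exact hT 2 (by omega)
      have t3 : ((List.take 3 rest == ([1, 1, 1] : List Int)) = decide (3 + 1 ≤ R)) := by
        rw [show ([1, 1, 1] : List Int) = List.replicate 3 (1:Int) from rfl]; exact hT 3 (by omega)
      have t4 : ((List.take 4 rest == ([1, 1, 1, 1] : List Int)) = decide (4 + 1 ≤ R)) := by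
        rw [show ([1, 1, 1, 1] : List Int) = List.replicate 4 (1:Int) from rfl]; exact hT 4 (by omega)
      have t5 : ((List.take 5 rest == ([1, 1, 1, 1, 1] : List Int)) = decide (5 + 1 ≤ R)) := by
        rw [show ([1, 1, 1, 1, 1] : List Int) = List.replicate 5 (1:Int) from rfl]; exact hT 5 (by omega)
      have hs : ¬ List.take 5 rest = [2, 3, 4, 5, 6] := fun h => h1 (by simp [h])
      have hsb : ((List.take 5 rest == ([2, 3, 4, 5, 6] : List Int)) = false) := beq_false_of_ne hs
      interval_cases R <;>
        simp [pvStepA, pvStepB, pvTable, pvRunScores, pvShrink, List.find?, List.lookup, hR, t1, t2, t3, t4, t5, hsb, hs, h1, h2]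
    by_cases hv2 : v = 2
    · subst hv2
      obtain ⟨R, hR⟩ : ∃ R, pvRunAux (List.take 5 rest) ((2:Int)) 1 = R := ⟨_, rfl⟩
      have hR1 : 1 ≤ R := by rw [← hR, pvRunAux_eq]; omega
      have hR6 : R ≤ 6 := by rw [← hR, pvRunAux_eq, takeWhile_take_len]; omega
      have hT : ∀ m : Nat, m ≤ 5 → ((List.take m rest == List.replicate m ((2:Int))) = decide (m + 1 ≤ R)) := by
        intro m hm
        have hiff : (List.take m rest = List.replicate m ((2:Int))) ↔ (m + 1 ≤ R) := by
          rw [take_eq_replicate_iff, ← hR, pvRunAux_eq, takeWhile_take_len]; omega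
        rw [beq_eq_decide, decide_eq_decide.mpr hiff]
      have t1 : ((List.take 1 rest == ([2] : List Int)) = decide (1 + 1 ≤ R)) := by
        rw [show ([2] : List Int) = List.replicate 1 (2:Int) from rfl]; exact hT 1 (by omega)
      have t2 : ((List.take 2 rest == ([2, 2] : List Int)) = decide (2 + 1 ≤ R)) := by
        rw [show ([2, 2] : List Int) = List.replicate 2 (2:Int) from rfl]; exact hT 2 (by omega)
      have t3 : ((List.take 3 rest == ([2, 2, 2] : List Int)) = decide (3 + 1 ≤ R)) := by
        rw [show ([2, 2, 2] : List Int) = List.replicate 3 (2:Int) from rfl]; exact hT 3 (by omega)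
      have t4 : ((List.take 4 rest == ([2, 2, 2, 2] : List Int)) = decide (4 + 1 ≤ R)) := by
        rw [show ([2, 2, 2, 2] : List Int) = List.replicate 4 (2:Int) from rfl]; exact hT 4 (by omega)
      have t5 : ((List.take 5 rest == ([2, 2, 2, 2, 2] : List Int)) = decide (5 + 1 ≤ R)) := by
        rw [show ([2, 2, 2, 2, 2] : List Int) = List.replicate 5 (2:Int) from rfl]; exact hT 5 (by omega)
      have hs : ¬ List.take 5 rest = [2, 3, 3, 4, 4] := fun h => h2 (by simp [h])
      have hsb : ((List.take 5 rest == ([2, 3, 3, 4, 4] : List Int)) = false) := beq_false_of_ne hs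
      interval_cases R <;>
        simp [pvStepA, pvStepB, pvTable, pvRunScores, pvShrink, List.find?, List.lookup, hR, t1, t2, t3, t4, t5, hsb, hs, h1, h2]
    by_cases hv3 : v = 3
    · subst hv3
      obtain ⟨R, hR⟩ : ∃ R, pvRunAux (List.take 5 rest) ((3:Int)) 1 = R := ⟨_, rfl⟩
      have hR1 : 1 ≤ R := by rw [← hR, pvRunAux_eq]; omega
      have hR6 : R ≤ 6 := by rw [← hR, pvRunAux_eq, takeWhile_take_len]; omega
      have hT : ∀ m : Nat, m ≤ 5 → ((List.take m rest == List.replicate m ((3:Int))) = decide (m + 1 ≤ R)) := by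
        intro m hm
        have hiff : (List.take m rest = List.replicate m ((3:Int))) ↔ (m + 1 ≤ R) := by
          rw [take_eq_replicate_iff, ← hR, pvRunAux_eq, takeWhile_take_len]; omega
        rw [beq_eq_decide, decide_eq_decide.mpr hiff]
      have t1 : ((List.take 1 rest == ([3] : List Int)) = decide (1 + 1 ≤ R)) := by
        rw [show ([3] : List Int) = List.replicate 1 (3:Int) from rfl]; exact hT 1 (by omega)
      have t2 : ((List.take 2 rest == ([3, 3] : List Int)) = decide (2 + 1 ≤ R)) := by
        rw [show ([3, 3] : List Int) = List.replicate 2 (3:Int) from rfl]; exact hT 2 (by omega)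
      have t3 : ((List.take 3 rest == ([3, 3, 3] : List Int)) = decide (3 + 1 ≤ R)) := by
        rw [show ([3, 3, 3] : List Int) = List.replicate 3 (3:Int) from rfl]; exact hT 3 (by omega)
      have t4 : ((List.take 4 rest == ([3, 3, 3, 3] : List Int)) = decide (4 + 1 ≤ R)) := by
        rw [show ([3, 3, 3, 3] : List Int) = List.replicate 4 (3:Int) from rfl]; exact hT 4 (by omega)
      have t5 : ((List.take 5 rest == ([3, 3, 3, 3, 3] : List Int)) = decide (5 + 1 ≤ R)) := by
        rw [show ([3, 3, 3, 3, 3] : List Int) = List.replicate 5 (3:Int) from rfl]; exact hT 5 (by omega)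
      interval_cases R <;>
        simp [pvStepA, pvStepB, pvTable, pvRunScores, pvShrink, List.find?, List.lookup, hR, t1, t2, t3, t4, t5, h1, h2]
    by_cases hv4 : v = 4
    · subst hv4
      obtain ⟨R, hR⟩ : ∃ R, pvRunAux (List.take 5 rest) ((4:Int)) 1 = R := ⟨_, rfl⟩
      have hR1 : 1 ≤ R := by rw [← hR, pvRunAux_eq]; omega
      have hR6 : R ≤ 6 := by rw [← hR, pvRunAux_eq, takeWhile_take_len]; omega
      have hT : ∀ m : Nat, m ≤ 5 → ((List.take m rest == List.replicate m ((4:Int))) = decide (m + 1 ≤ R)) := by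
        intro m hm
        have hiff : (List.take m rest = List.replicate m ((4:Int))) ↔ (m + 1 ≤ R) := by
          rw [take_eq_replicate_iff, ← hR, pvRunAux_eq, takeWhile_take_len]; omega
        rw [beq_eq_decide, decide_eq_decide.mpr hiff]
      have t1 : ((List.take 1 rest == ([4] : List Int)) = decide (1 + 1 ≤ R)) := by
        rw [show ([4] : List Int) = List.replicate 1 (4:Int) from rfl]; exact hT 1 (by omega)
      have t2 : ((List.take 2 rest == ([4, 4] : List Int)) = decide (2 + 1 ≤ R)) := by
        rw [show ([4, 4] : List Int) = List.replicate 2 (4:Int) from rfl]; exact hT 2 (by omega)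
      have t3 : ((List.take 3 rest == ([4, 4, 4] : List Int)) = decide (3 + 1 ≤ R)) := by
        rw [show ([4, 4, 4] : List Int) = List.replicate 3 (4:Int) from rfl]; exact hT 3 (by omega)
      have t4 : ((List.take 4 rest == ([4, 4, 4, 4] : List Int)) = decide (4 + 1 ≤ R)) := by
        rw [show ([4, 4, 4, 4] : List Int) = List.replicate 4 (4:Int) from rfl]; exact hT 4 (by omega)
      have t5 : ((List.take 5 rest == ([4, 4, 4, 4, 4] : List Int)) = decide (5 + 1 ≤ R)) := by
        rw [show ([4, 4, 4, 4, 4] : List Int) = List.replicate 5 (4:Int) from rfl]; exact hT 5 (by omega)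
      interval_cases R <;>
        simp [pvStepA, pvStepB, pvTable, pvRunScores, pvShrink, List.find?, List.lookup, hR, t1, t2, t3, t4, t5, h1, h2]
    by_cases hv5 : v = 5
    · subst hv5
      obtain ⟨R, hR⟩ : ∃ R, pvRunAux (List.take 5 rest) ((5:Int)) 1 = R := ⟨_, rfl⟩
      have hR1 : 1 ≤ R := by rw [← hR, pvRunAux_eq]; omega
      have hR6 : R ≤ 6 := by rw [← hR, pvRunAux_eq, takeWhile_take_len]; omega
      have hT : ∀ m : Nat, m ≤ 5 → ((List.take m rest == List.replicate m ((5:Int))) = decide (m + 1 ≤ R)) := by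
        intro m hm
        have hiff : (List.take m rest = List.replicate m ((5:Int))) ↔ (m + 1 ≤ R) := by
          rw [take_eq_replicate_iff, ← hR, pvRunAux_eq, takeWhile_take_len]; omega
        rw [beq_eq_decide, decide_eq_decide.mpr hiff]
      have t1 : ((List.take 1 rest == ([5] : List Int)) = decide (1 + 1 ≤ R)) := by
        rw [show ([5] : List Int) = List.replicate 1 (5:Int) from rfl]; exact hT 1 (by omega)
      have t2 : ((List.take 2 rest == ([5, 5] : List Int)) = decide (2 + 1 ≤ R)) := by
        rw [show ([5, 5] : List Int) = List.replicate 2 (5:Int) from rfl]; exact hT 2 (by omega)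
      have t3 : ((List.take 3 rest == ([5, 5, 5] : List Int)) = decide (3 + 1 ≤ R)) := by
        rw [show ([5, 5, 5] : List Int) = List.replicate 3 (5:Int) from rfl]; exact hT 3 (by omega)
      have t4 : ((List.take 4 rest == ([5, 5, 5, 5] : List Int)) = decide (4 + 1 ≤ R)) := by
        rw [show ([5, 5, 5, 5] : List Int) = List.replicate 4 (5:Int) from rfl]; exact hT 4 (by omega)
      have t5 : ((List.take 5 rest == ([5, 5, 5, 5, 5] : List Int)) = decide (5 + 1 ≤ R)) := by
        rw [show ([5, 5, 5, 5, 5] : List Int) = List.replicate 5 (5:Int) from rfl]; exact hT 5 (by omega)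
      interval_cases R <;>
        simp [pvStepA, pvStepB, pvTable, pvRunScores, pvShrink, List.find?, List.lookup, hR, t1, t2, t3, t4, t5, h1, h2]
    by_cases hv6 : v = 6
    · subst hv6
      obtain ⟨R, hR⟩ : ∃ R, pvRunAux (List.take 5 rest) ((6:Int)) 1 = R := ⟨_, rfl⟩
      have hR1 : 1 ≤ R := by rw [← hR, pvRunAux_eq]; omega
      have hR6 : R ≤ 6 := by rw [← hR, pvRunAux_eq, takeWhile_take_len]; omega
      have hT : ∀ m : Nat, m ≤ 5 → ((List.take m rest == List.replicate m ((6:Int))) = decide (m + 1 ≤ R)) := by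
        intro m hm
        have hiff : (List.take m rest = List.replicate m ((6:Int))) ↔ (m + 1 ≤ R) := by
          rw [take_eq_replicate_iff, ← hR, pvRunAux_eq, takeWhile_take_len]; omega
        rw [beq_eq_decide, decide_eq_decide.mpr hiff]
      have t1 : ((List.take 1 rest == ([6] : List Int)) = decide (1 + 1 ≤ R)) := by
        rw [show ([6] : List Int) = List.replicate 1 (6:Int) from rfl]; exact hT 1 (by omega)
      have t2 : ((List.take 2 rest == ([6, 6] : List Int)) = decide (2 + 1 ≤ R)) := by
        rw [show ([6, 6] : List Int) = List.replicate 2 (6:Int) from rfl]; exact hT 2 (by omega)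
      have t3 : ((List.take 3 rest == ([6, 6, 6] : List Int)) = decide (3 + 1 ≤ R)) := by
        rw [show ([6, 6, 6] : List Int) = List.replicate 3 (6:Int) from rfl]; exact hT 3 (by omega)
      have t4 : ((List.take 4 rest == ([6, 6, 6, 6] : List Int)) = decide (4 + 1 ≤ R)) := by
        rw [show ([6, 6, 6, 6] : List Int) = List.replicate 4 (6:Int) from rfl]; exact hT 4 (by omega)
      have t5 : ((List.take 5 rest == ([6, 6, 6, 6, 6] : List Int)) = decide (5 + 1 ≤ R)) := by
        rw [show ([6, 6, 6, 6, 6] : List Int) = List.replicate 5 (6:Int) from rfl]; exact hT 5 (by omega)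
      interval_cases R <;>
        simp [pvStepA, pvStepB, pvTable, pvRunScores, pvShrink, List.find?, List.lookup, hR, t1, t2, t3, t4, t5, h1, h2]
    · have l1 : ((v:Int) == 1) = false := beq_false_of_ne hv1
      have l2 : ((v:Int) == 2) = false := beq_false_of_ne hv2
      have l3 : ((v:Int) == 3) = false := beq_false_of_ne hv3
      have l4 : ((v:Int) == 4) = false := beq_false_of_ne hv4
      have l5 : ((v:Int) == 5) = false := beq_false_of_ne hv5
      have l6 : ((v:Int) == 6) = false := beq_false_of_ne hv6
      simp [pvStepA, pvStepB, pvTable, pvRunScores, List.find?, List.lookup, l1, l2, l3, l4, l5, l6, hv1, hv2, hv3, hv4, hv5, hv6, h1, h2]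

lemma pvLoopB_step (fuel : Nat) (roll : List Int) (acc : List (Int × List Int)) :
    pvGreedLoopB (fuel + 1) roll acc =
      match pvStepB roll with
      | some vv => pvGreedLoopB fuel (roll.drop vv.2.length) (acc ++ [vv])
      | none => acc := by
  cases roll with
  | nil => rfl
  | cons v rest =>
    conv_lhs => rw [pvGreedLoopB]
    conv_rhs => rw [pvStepB]
    by_cases h1 : (v :: rest).take 6 = [1, 2, 3, 4, 5, 6]
    · simp only [if_pos h1]; simp
    by_cases h2 : (v :: rest).take 6 = [2, 2, 3, 3, 4, 4]
    · simp only [if_neg h1, if_pos h2]; simp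
    simp only [if_neg h1, if_neg h2]
    cases hl : pvRunScores.lookup v with
    | none => simp only [hl]
    | some scores =>
      simp only [hl]
      by_cases hz : pvShrink scores (pvRunAux (rest.take 5) v 1) = 0
      · simp only [if_pos hz]
      · simp only [if_neg hz]; simp

lemma pvLoop_eq (fuel : Nat) : ∀ roll acc, pvGreedLoopA fuel roll acc = pvGreedLoopB fuel roll acc := by
  induction fuel with
  | zero => intro roll acc; rfl
  | succ n ih =>
    intro roll acc
    have hA : pvGreedLoopA (n + 1) roll acc =
        match pvStepA roll with
        | some vv => pvGreedLoopA n (roll.drop vv.2.length) (acc ++ [vv])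
        | none => acc := rfl
    rw [hA, pvLoopB_step, pvStep_eq]
    cases pvStepB roll with
    | none => rfl
    | some vv => exact ih _ _

-- ===== VERDICT (by name: the statement is the Claim_ definition above) =====
theorem greed_roll_score_spec : Claim_equal_greed_roll_score := by
  intro roll _
  unfold Spec_greed_roll_score greed_roll_score greed_roll_score_alt
  exact pvLoop_eq _ _ _
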